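-- pv_equiv track=rewrite | github.com/drinconcam364/ECE652 | composable_drain_phase1_research.py | build_schedule_periodic
-- ===== SOURCE A (Python) =====
-- from typing import Dict, List, Optional, Tuple
-- from collections import defaultdict, deque
--
-- def build_schedule_periodic(
--     start_cycle: int,
--     end_cycle: int,
--     period: int,
--     flows: List[Tuple[str, str]],
--     packets_per_flow: int = 1,
-- ):
--     schedule = defaultdict(list)
--     for cyc in range(start_cycle, end_cycle + 1, period):
--         for _ in range(packets_per_flow):
--             for src, dst in flows:
--                 schedule[cyc].append((src, dst))
--     return schedule
-- ===== SOURCE B (Python) =====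
-- from collections import defaultdict
--
--
-- def build_schedule_periodic(
--     start_cycle,
--     end_cycle,
--     period,
--     flows,
--     packets_per_flow=1,
-- ):
--     # Closed-form cycle count: ceil((end_cycle + 1 - start_cycle) / period), clamped at 0;
--     # each scheduled cycle gets the flow list repeated packets_per_flow times.
--     if flows and packets_per_flow > 0:
--         n = max(0, -((start_cycle - end_cycle - 1) // period))
--     else:
--         n = 0
--     return defaultdict(
--         list,
--         {start_cycle + i * period: flows * packets_per_flow for i in range(n)},
--     )
-- ===== Notes on version B (the rewrite author's own statement) =====
-- stated objective: alternative
-- what changed: A's three nested append loops are replaced by a closed-form ceil-division cycle count, Python list multiplication for the repeated flow list, and a single dict comprehension keyed by start_cycle + i*period.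
import Mathlib
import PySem

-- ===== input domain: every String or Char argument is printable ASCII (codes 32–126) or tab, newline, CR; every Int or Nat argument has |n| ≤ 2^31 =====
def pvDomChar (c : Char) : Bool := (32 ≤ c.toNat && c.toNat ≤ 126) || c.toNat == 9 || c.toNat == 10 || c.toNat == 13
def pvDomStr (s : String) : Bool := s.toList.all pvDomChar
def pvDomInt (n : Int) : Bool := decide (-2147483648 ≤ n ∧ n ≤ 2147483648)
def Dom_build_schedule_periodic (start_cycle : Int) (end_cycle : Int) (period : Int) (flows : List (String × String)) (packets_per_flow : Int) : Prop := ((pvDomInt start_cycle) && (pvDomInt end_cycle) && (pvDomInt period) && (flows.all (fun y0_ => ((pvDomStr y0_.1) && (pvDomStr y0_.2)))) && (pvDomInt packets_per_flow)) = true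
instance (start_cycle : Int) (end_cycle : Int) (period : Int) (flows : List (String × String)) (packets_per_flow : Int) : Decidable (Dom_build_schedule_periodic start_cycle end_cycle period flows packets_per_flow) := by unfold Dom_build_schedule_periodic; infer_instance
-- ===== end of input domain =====

-- B replaces A's triple nested append loop by a closed-form cycle count (ceil division)
-- and a dict comprehension assigning the repeated flow list per cycle (alternative decomposition).


-- ===== PORT A =====
-- schedule[cyc].append((src, dst)) on a defaultdict(list) is Dict.modify cyc [] (· ++ [p])
def build_schedule_periodic (start_cycle : Int) (end_cycle : Int) (period : Int) (flows : List (String × String)) (packets_per_flow : Int) : List (Int × List (String × String)) :=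
  ((PySem.List.pyRange start_cycle (end_cycle + 1) period).foldl
    (fun sch cyc =>
      (PySem.List.pyRange 0 packets_per_flow 1).foldl
        (fun sch _ =>
          flows.foldl (fun sch p => sch.modify cyc [] (· ++ [p])) sch) sch)
    (PySem.Dict.empty : PySem.Dict Int (List (String × String)))).items

-- ===== PORT B =====
-- n = max(0, -((start-end-1)//period)) = ceil((end+1-start)/period) clamped at 0 (Python floor division);
-- the dict comprehension {start + i*period: flows * packets_per_flow for i in range(n)};
-- 'flows * packets_per_flow' (list repetition) is packets_per_flow.toNat concatenated copies.
def build_schedule_periodic_alt (start_cycle : Int) (end_cycle : Int) (period : Int) (flows : List (String × String)) (packets_per_flow : Int) : List (Int × List (String × String)) :=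
  let n : Int :=
    if flows ≠ [] ∧ 0 < packets_per_flow then
      max 0 (-(PySem.Int.floordiv (start_cycle - end_cycle - 1) period))
    else 0
  ((List.range n.toNat).foldl
    (fun d i => d.insert (start_cycle + (i : Int) * period)
      ((List.range packets_per_flow.toNat).flatMap (fun _ => flows)))
    (PySem.Dict.empty : PySem.Dict Int (List (String × String)))).items

-- ===== PRECONDITION & SPEC =====
-- Pre_ excludes only period = 0, where Python's range (A) raises ValueError
-- (and B's floor division raises ZeroDivisionError when it has packets to place).
def Pre_build_schedule_periodic (start_cycle : Int) (end_cycle : Int) (period : Int) (flows : List (String × String)) (packets_per_flow : Int) : Prop := period ≠ 0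
instance (start_cycle : Int) (end_cycle : Int) (period : Int) (flows : List (String × String)) (packets_per_flow : Int) : Decidable (Pre_build_schedule_periodic start_cycle end_cycle period flows packets_per_flow) := by unfold Pre_build_schedule_periodic; infer_instance

def pvWitness_build_schedule_periodic : Int × Int × Int × (List (String × String)) × Int := (0, 3, 1, [("a", "b")], 1)

def Spec_build_schedule_periodic (start_cycle : Int) (end_cycle : Int) (period : Int) (flows : List (String × String)) (packets_per_flow : Int) (out : List (Int × List (String × String))) : Prop := out = build_schedule_periodic_alt start_cycle end_cycle period flows packets_per_flow
instance (start_cycle : Int) (end_cycle : Int) (period : Int) (flows : List (String × String)) (packets_per_flow : Int) (out : List (Int × List (String × String))) : Decidable (Spec_build_schedule_periodic start_cycle end_cycle period flows packets_per_flow out) := by unfold Spec_build_schedule_periodic; infer_instance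

-- ===== CLAIM (what is proved, stated in full; the proofs are below) =====
def Claim_equal_build_schedule_periodic : Prop := ∀ (start_cycle : Int) (end_cycle : Int) (period : Int) (flows : List (String × String)) (packets_per_flow : Int), Dom_build_schedule_periodic start_cycle end_cycle period flows packets_per_flow → Pre_build_schedule_periodic start_cycle end_cycle period flows packets_per_flow → Spec_build_schedule_periodic start_cycle end_cycle period flows packets_per_flow (build_schedule_periodic start_cycle end_cycle period flows packets_per_flow)

-- ===== LEMMAS AND PROOFS =====

-- folding over a flatMap is the nested fold
theorem pv_foldl_flatMap {α β γ : Type} (l : List α) (f : α → List β) (g : γ → β → γ) (init : γ) :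
    (l.flatMap f).foldl g init = l.foldl (fun acc x => (f x).foldl g acc) init := by
  induction l generalizing init with
  | nil => rfl
  | cons x xs ih => simp [List.flatMap_cons, List.foldl_append, ih]

-- a run of appends at one key collapses to a single insert
theorem pv_foldl_modify_append (row : List (String × String)) (hrow : row ≠ [])
    (d : PySem.Dict Int (List (String × String))) (k : Int) :
    row.foldl (fun sch p => sch.insert k (sch.getD k [] ++ [p])) d
      = d.insert k (d.getD k [] ++ row) := by
  induction row generalizing d with
  | nil => exact absurd rfl hrow
  | cons p rest ih =>
    rw [List.foldl_cons]
    by_cases hr : rest = []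
    · subst hr; rfl
    · rw [ih hr, PySem.Dict.getD_insert_self, PySem.Dict.insert_insert_self,
        List.append_assoc, List.singleton_append]

-- insert cyc (getD cyc [] ++ row) over fresh distinct keys = insert cyc row over them
theorem pv_foldl_insert_fresh_getD (row : List (String × String))
    (cycles : List Int) (d : PySem.Dict Int (List (String × String)))
    (hfresh : ∀ c ∈ cycles, d.contains c = false) (hnd : cycles.Nodup) :
    cycles.foldl (fun sch c => sch.insert c (sch.getD c [] ++ row)) d
      = cycles.foldl (fun sch c => sch.insert c row) d := by
  induction cycles generalizing d with
  | nil => rfl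
  | cons c rest ih =>
    have hc : d.contains c = false := hfresh c (List.mem_cons_self ..)
    simp only [List.foldl_cons, PySem.Dict.getD_of_not_contains d [] hc, List.nil_append]
    refine ih _ ?_ (List.Nodup.of_cons hnd)
    intro c' hc'
    rw [PySem.Dict.contains_insert]
    have hne : c' ≠ c := fun h => (List.nodup_cons.mp hnd).1 (h ▸ hc')
    simp [hne, hfresh c' (List.mem_cons_of_mem _ hc')]

theorem pv_nodup_pyRange (a b s : Int) : (PySem.List.pyRange a b s).Nodup := by
  unfold PySem.List.pyRange
  split
  · simp
  · next hs =>
    refine List.Nodup.map ?_ List.nodup_range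
    intro k1 k2 h
    have h2 : s * (k1 : Int) = s * (k2 : Int) := add_left_cancel h
    exact_mod_cast mul_left_cancel₀ hs h2

theorem pv_foldl_id {α β : Type} (l : List α) (d : β) :
    l.foldl (fun s _ => s) d = d := by
  induction l <;> simp [*]

-- ceiling division via floor division: (x + m - 1)/m = x/m + [m ∤ x]  (m > 0)
theorem pv_ceil (x m : Int) (hm : 0 < m) :
    (x + m - 1) / m = x / m + if m ∣ x then 0 else 1 := by
  have h0 : m * (x / m) + x % m = x := Int.mul_ediv_add_emod x m
  have hr0 : 0 ≤ x % m := Int.emod_nonneg x (ne_of_gt hm)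
  have hrm : x % m < m := Int.emod_lt_of_pos x hm
  by_cases h : m ∣ x
  · have hz : x % m = 0 := Int.emod_eq_zero_of_dvd h
    have hq : (x + m - 1) / m = x / m :=
      ((Int.ediv_emod_unique (r := m - 1) (q := x / m) hm).mpr
        ⟨by linarith, by linarith, by linarith⟩).1
    simp [h, hq]
  · have hz : x % m ≠ 0 := fun hc => h (Int.dvd_of_emod_eq_zero hc)
    have hexp : m * (x / m + 1) = m * (x / m) + m := by ring
    have hq : (x + m - 1) / m = x / m + 1 :=
      ((Int.ediv_emod_unique (r := x % m - 1) (q := x / m + 1) hm).mpr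
        ⟨by linarith, by omega, by omega⟩).1
    simp [h, hq]

-- the closed-form count:  -( (a-b).fdiv p ) = (ceil of (b-a)/p), as a single floor expression
theorem pv_n_pos (a b p : Int) (hp : 0 < p) :
    -((a - b).fdiv p) = (b - a + p - 1) / p := by
  rw [Int.fdiv_eq_ediv_of_nonneg _ (le_of_lt hp)]
  have hab : a - b = -(b - a) := by ring
  rw [hab, Int.neg_ediv]
  have hs : p.sign = 1 := Int.sign_eq_one_of_pos hp
  rw [pv_ceil (b - a) p hp, hs]
  by_cases h : p ∣ (b - a) <;> simp [h] <;> ring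

theorem pv_n_neg (a b p : Int) (hp : p < 0) :
    -((a - b).fdiv p) = (a - b + (-p) - 1) / (-p) := by
  have hm : 0 < -p := by omega
  have key : (a - b).fdiv p
      = if (-p) ∣ (a - b) then -((a - b) / (-p)) else -((a - b) / (-p)) - 1 := by
    conv_lhs => rw [show p = -(-p) by ring]
    rw [Int.fdiv_neg (by omega : -p ≠ 0), Int.fdiv_eq_ediv_of_nonneg _ (le_of_lt hm)]
  rw [key, pv_ceil (a - b) (-p) hm]
  by_cases h : (-p) ∣ (a - b) <;> simp [h] <;> ring

-- clamping: max 0 collapses exactly as pyRange's emptiness test does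
theorem pv_clamp (y m : Int) (hm : 0 < m) :
    (max 0 ((y + m - 1) / m)).toNat = if 0 < y then ((y + m - 1) / m).toNat else 0 := by
  by_cases hy : 0 < y
  · have : 0 ≤ (y + m - 1) / m := Int.ediv_nonneg (by omega) (le_of_lt hm)
    rw [if_pos hy, max_eq_right this]
  · have h1 : (y + m - 1) / m ≤ (m - 1) / m := Int.ediv_le_ediv hm (by omega)
    have h2 : (m - 1) / m = 0 := Int.ediv_eq_zero_of_lt (by omega) (by omega)
    rw [if_neg hy]
    omega

-- pyRange as a mapped List.range with B's closed-form count
theorem pv_pyRange_eq (a b p : Int) (hp : p ≠ 0) :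
    PySem.List.pyRange a b p
      = (List.range (max 0 (-((a - b).fdiv p))).toNat).map (fun (k : Nat) => a + p * (k : Int)) := by
  unfold PySem.List.pyRange
  rw [if_neg hp]
  rcases lt_or_gt_of_ne hp with hneg | hpos
  · rw [if_neg (by omega : ¬ 0 < p), pv_n_neg a b p hneg]
    rw [pv_clamp (a - b) (-p) (by omega)]
    have hiff : (b < a) = (0 < a - b) := propext (by omega)
    simp only [hiff]
  · rw [if_pos hpos, pv_n_pos a b p hpos]
    rw [pv_clamp (b - a) p hpos]
    have hiff : (a < b) = (0 < b - a) := propext (by omega)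
    simp only [hiff]

-- A's repeated row equals B's repeated row
theorem pv_row_eq (ppf : Int) (flows : List (String × String)) :
    (PySem.List.pyRange 0 ppf 1).flatMap (fun _ => flows)
      = (List.range ppf.toNat).flatMap (fun _ => flows) := by
  have h : PySem.List.pyRange 0 ppf 1
      = (List.range ppf.toNat).map (fun (k : Nat) => (0:Int) + 1 * (k : Int)) := by
    unfold PySem.List.pyRange
    rw [if_neg (by omega : (1:Int) ≠ 0), if_pos (by omega : (0:Int) < 1)]
    by_cases hp : (0:Int) < ppf
    · rw [if_pos hp, show ppf - 0 + 1 - 1 = ppf by ring, Int.ediv_one]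
    · rw [if_neg hp]
      have h0 : ppf.toNat = 0 := by omega
      rw [h0]
  rw [h, List.flatMap_map]

-- B's row is empty exactly when there is nothing to schedule
theorem pv_row_empty_iff (ppf : Int) (flows : List (String × String)) :
    ((List.range ppf.toNat).flatMap (fun _ => flows) = []) ↔ ¬(flows ≠ [] ∧ 0 < ppf) := by
  constructor
  · intro h hcond
    have hn : 0 < ppf.toNat := by omega
    have : flows = [] := by
      have := List.flatMap_eq_nil_iff.mp h 0 (List.mem_range.mpr hn)
      exact this
    exact hcond.1 this
  · intro h
    rcases not_and_or.mp h with hf | hppf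
    · have : flows = [] := not_not.mp hf
      simp [this]
    · have : ppf.toNat = 0 := by omega
      simp [this]

theorem build_schedule_periodic_spec : Claim_equal_build_schedule_periodic := by
  intro start_cycle end_cycle period flows packets_per_flow _ hp
  unfold Spec_build_schedule_periodic build_schedule_periodic build_schedule_periodic_alt
  simp only [PySem.Dict.modify]
  -- collapse A's inner two loops into one pass over the repeated row
  have hinner : ∀ (sch : PySem.Dict Int (List (String × String))) (cyc : Int),
      (PySem.List.pyRange 0 packets_per_flow 1).foldl
        (fun sch _ => flows.foldl (fun sch p => sch.insert cyc (sch.getD cyc [] ++ [p])) sch) sch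
        = ((List.range packets_per_flow.toNat).flatMap (fun _ => flows)).foldl
            (fun sch p => sch.insert cyc (sch.getD cyc [] ++ [p])) sch := by
    intro sch cyc
    rw [← pv_row_eq, pv_foldl_flatMap]
  simp only [hinner]
  set row := (List.range packets_per_flow.toNat).flatMap (fun _ => flows) with hrowdef
  by_cases hcond : flows ≠ [] ∧ 0 < packets_per_flow
  · have hrow : row ≠ [] := fun h => (pv_row_empty_iff _ _).mp h hcond
    simp only [pv_foldl_modify_append row hrow]
    rw [pv_foldl_insert_fresh_getD row _ _ (fun c _ => PySem.Dict.contains_empty c)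
      (pv_nodup_pyRange _ _ _)]
    have hkeys : PySem.List.pyRange start_cycle (end_cycle + 1) period
        = (List.range (max 0 (-((start_cycle - end_cycle - 1).fdiv period))).toNat).map
            (fun (k : Nat) => start_cycle + period * (k : Int)) := by
      have h1 : start_cycle - (end_cycle + 1) = start_cycle - end_cycle - 1 := by ring
      rw [pv_pyRange_eq start_cycle (end_cycle + 1) period hp, h1]
    rw [hkeys, List.foldl_map]
    simp only [if_pos hcond, PySem.Int.floordiv]
    have hfun : ∀ (d : PySem.Dict Int (List (String × String))) (k : Nat),
        d.insert (start_cycle + period * (k : Int)) row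
          = d.insert (start_cycle + (k : Int) * period) row :=
      fun d k => by rw [mul_comm]
    simp only [hfun]
  · have hrow : row = [] := (pv_row_empty_iff _ _).mpr hcond
    simp only [hrow, List.foldl_nil, pv_foldl_id]
    simp [if_neg hcond]
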